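-- pv_equiv track=rewrite | github.com/Henry3g/Incubator | Section_3.py | name_depuplication
-- ===== SOURCE A (Python) =====
-- def name_depuplication(bank_names, bank_employees):
--     names_simplified = []
--     employees_simplified = []
--     d = {}
--     for i in range(len(bank_names)-1,-1,-1):
--
--         if bank_names[i] not in d:
--             d[bank_names[i]] = 1
--             names_simplified.append(bank_names[i])
--             employees_simplified.append(bank_employees[i])
--     names_simplified.reverse()
--     employees_simplified.reverse()
--     return names_simplified, employees_simplified
-- ===== SOURCE B (Python) =====
-- def name_depuplication(bank_names, bank_employees):
--     last_index = {}
--     for i, name in enumerate(bank_names):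
--         last_index[name] = i
--     names_simplified = []
--     employees_simplified = []
--     for i, (name, emp) in enumerate(zip(bank_names, bank_employees)):
--         if last_index[name] == i:
--             names_simplified.append(name)
--             employees_simplified.append(emp)
--     return names_simplified, employees_simplified
-- ===== Notes on version B (the rewrite author's own statement) =====
-- stated objective: alternative
-- what changed: Replaces the reverse scan with a seen-membership dict plus two final reversals by two forward passes: one builds a name-to-last-index map, the second keeps exactly the positions that equal their name's last index, so nothing is reversed.
import Mathlib
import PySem

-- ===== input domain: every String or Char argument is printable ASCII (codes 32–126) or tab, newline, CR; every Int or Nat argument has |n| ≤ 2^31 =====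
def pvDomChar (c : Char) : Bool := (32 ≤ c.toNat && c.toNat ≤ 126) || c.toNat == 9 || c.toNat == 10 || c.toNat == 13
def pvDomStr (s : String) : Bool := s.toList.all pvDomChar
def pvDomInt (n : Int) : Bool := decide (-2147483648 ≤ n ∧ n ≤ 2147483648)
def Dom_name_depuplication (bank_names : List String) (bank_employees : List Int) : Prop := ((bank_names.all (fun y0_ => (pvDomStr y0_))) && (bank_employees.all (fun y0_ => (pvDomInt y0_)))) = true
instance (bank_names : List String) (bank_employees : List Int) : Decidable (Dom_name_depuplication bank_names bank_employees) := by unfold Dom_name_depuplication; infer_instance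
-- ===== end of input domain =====

-- B replaces A's reverse index scan (seen-dict, append, reverse at the end) by two forward
-- passes: build a name→last-index dict, then keep the positions equal to their name's last index.
-- Equivalence of the RETURN value is proved on Pre_ (employees at least as long as names).

-- ===== PORT A =====
-- literal port of A: descending index loop, membership dict, two reversals at the end
def name_depuplication (bank_names : List String) (bank_employees : List Int) : List String × List Int :=
  match (PySem.List.pyRange ((bank_names.length : Int) - 1) (-1) (-1)).foldl
      (fun (st : List String × List Int × PySem.Dict String Int) i =>
        let name := PySem.List.pyGetD bank_names i ""
        if st.2.2.contains name then st
        else (st.1 ++ [name], st.2.1 ++ [PySem.List.pyGetD bank_employees i 0], st.2.2.insert name 1))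
      ([], [], PySem.Dict.empty) with
  | (names_simplified, employees_simplified, _) =>
    (names_simplified.reverse, employees_simplified.reverse)

-- ===== PORT B =====
-- literal port of B: first pass builds the last-index dict, second pass filters zipped pairs
def name_depuplication_alt (bank_names : List String) (bank_employees : List Int) : List String × List Int :=
  let last_index :=
    (PySem.List.enumerate bank_names 0).foldl
      (fun (d : PySem.Dict String Int) p => d.insert p.2 p.1) PySem.Dict.empty
  (PySem.List.enumerate (bank_names.zip bank_employees) 0).foldl
    (fun (acc : List String × List Int) q =>
      if last_index.getD q.2.1 (-1) = q.1 then (acc.1 ++ [q.2.1], acc.2 ++ [q.2.2]) else acc)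
    ([], [])

-- ===== PRECONDITION & SPEC =====
-- Pre_ excludes exactly the inputs where A raises IndexError (bank_employees shorter than bank_names)
def Pre_name_depuplication (bank_names : List String) (bank_employees : List Int) : Prop :=
  bank_names.length ≤ bank_employees.length
instance (bank_names : List String) (bank_employees : List Int) : Decidable (Pre_name_depuplication bank_names bank_employees) := by unfold Pre_name_depuplication; infer_instance
def pvWitness_name_depuplication : List String × List Int := (["a", "b", "a"], [1, 2, 3])

def Spec_name_depuplication (bank_names : List String) (bank_employees : List Int) (out : List String × List Int) : Prop := out = name_depuplication_alt bank_names bank_employees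
instance (bank_names : List String) (bank_employees : List Int) (out : List String × List Int) : Decidable (Spec_name_depuplication bank_names bank_employees out) := by unfold Spec_name_depuplication; infer_instance

-- ===== CLAIM (what is proved, stated in full; the proofs are below) =====
def Claim_equal_name_depuplication : Prop := ∀ (bank_names : List String) (bank_employees : List Int), Dom_name_depuplication bank_names bank_employees → Pre_name_depuplication bank_names bank_employees → Spec_name_depuplication bank_names bank_employees (name_depuplication bank_names bank_employees)

-- ===== LEMMAS AND PROOFS =====

-- the common reference: keep a pair iff its name does not occur later
def keepLast : List (String × Int) → List (String × Int)
  | [] => []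
  | p :: rest => if p.1 ∈ rest.map Prod.fst then keepLast rest else p :: keepLast rest

-- ---- A side ----

theorem pair_map_range (ns : List String) (es : List Int) (h : ns.length ≤ es.length) :
    (PySem.List.pyRange 0 (ns.length : Int) 1).map
      (fun j => (PySem.List.pyGetD ns j "", PySem.List.pyGetD es j 0)) = ns.zip es := by
  apply List.ext_getElem
  · simp [PySem.List.length_pyRange_one]; omega
  · intro k h1 h2
    have hk : k < ns.length := by
      simpa [PySem.List.length_pyRange_one] using h1
    have hke : k < es.length := lt_of_lt_of_le hk h
    simp [PySem.List.getElem_pyRange_one, PySem.List.pyGetD_natCast,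
      List.getD_eq_getElem?_getD, hk, hke]

theorem A_foldr (l : List (String × Int)) :
    (l.foldr (fun p (st : List String × List Int × PySem.Dict String Int) =>
        if st.2.2.contains p.1 then st
        else (st.1 ++ [p.1], st.2.1 ++ [p.2], st.2.2.insert p.1 1))
      ([], [], PySem.Dict.empty)).1 = ((keepLast l).map Prod.fst).reverse ∧
    (l.foldr (fun p (st : List String × List Int × PySem.Dict String Int) =>
        if st.2.2.contains p.1 then st
        else (st.1 ++ [p.1], st.2.1 ++ [p.2], st.2.2.insert p.1 1))
      ([], [], PySem.Dict.empty)).2.1 = ((keepLast l).map Prod.snd).reverse ∧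
    ∀ name, ((l.foldr (fun p (st : List String × List Int × PySem.Dict String Int) =>
        if st.2.2.contains p.1 then st
        else (st.1 ++ [p.1], st.2.1 ++ [p.2], st.2.2.insert p.1 1))
      ([], [], PySem.Dict.empty)).2.2.contains name = true ↔ name ∈ l.map Prod.fst) := by
  induction l with
  | nil => refine ⟨rfl, rfl, fun name => ?_⟩; simp [PySem.Dict.contains_empty]
  | cons p rest ih =>
    obtain ⟨ih1, ih2, ih3⟩ := ih
    by_cases hmem : p.1 ∈ rest.map Prod.fst
    · have hc := (ih3 p.1).mpr hmem
      refine ⟨?_, ?_, fun name => ?_⟩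
      · rw [List.foldr_cons, if_pos hc, keepLast, if_pos hmem, ih1]
      · rw [List.foldr_cons, if_pos hc, keepLast, if_pos hmem, ih2]
      · rw [List.foldr_cons, if_pos hc, ih3 name, List.map_cons, List.mem_cons]
        exact ⟨Or.inr, fun h => h.elim (fun he => he ▸ hmem) id⟩
    · have hc : (rest.foldr (fun p (st : List String × List Int × PySem.Dict String Int) =>
            if st.2.2.contains p.1 then st
            else (st.1 ++ [p.1], st.2.1 ++ [p.2], st.2.2.insert p.1 1))
          ([], [], PySem.Dict.empty)).2.2.contains p.1 = false := by
        rcases Bool.eq_false_or_eq_true ((rest.foldr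
            (fun p (st : List String × List Int × PySem.Dict String Int) =>
              if st.2.2.contains p.1 then st
              else (st.1 ++ [p.1], st.2.1 ++ [p.2], st.2.2.insert p.1 1))
            ([], [], PySem.Dict.empty)).2.2.contains p.1) with hX | hX
        · exact absurd ((ih3 p.1).mp hX) hmem
        · exact hX
      refine ⟨?_, ?_, fun name => ?_⟩
      · rw [List.foldr_cons, if_neg (by simp [hc]), keepLast, if_neg hmem]
        simp [ih1]
      · rw [List.foldr_cons, if_neg (by simp [hc]), keepLast, if_neg hmem]
        simp [ih2]
      · rw [List.foldr_cons, if_neg (by simp [hc])]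
        rw [show ((rest.foldr (fun p (st : List String × List Int × PySem.Dict String Int) =>
              if st.2.2.contains p.1 then st
              else (st.1 ++ [p.1], st.2.1 ++ [p.2], st.2.2.insert p.1 1))
            ([], [], PySem.Dict.empty)).1 ++ [p.1],
            (rest.foldr (fun p (st : List String × List Int × PySem.Dict String Int) =>
              if st.2.2.contains p.1 then st
              else (st.1 ++ [p.1], st.2.1 ++ [p.2], st.2.2.insert p.1 1))
            ([], [], PySem.Dict.empty)).2.1 ++ [p.2],
            (rest.foldr (fun p (st : List String × List Int × PySem.Dict String Int) =>
              if st.2.2.contains p.1 then st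
              else (st.1 ++ [p.1], st.2.1 ++ [p.2], st.2.2.insert p.1 1))
            ([], [], PySem.Dict.empty)).2.2.insert p.1 1).2.2 =
          (rest.foldr (fun p (st : List String × List Int × PySem.Dict String Int) =>
              if st.2.2.contains p.1 then st
              else (st.1 ++ [p.1], st.2.1 ++ [p.2], st.2.2.insert p.1 1))
            ([], [], PySem.Dict.empty)).2.2.insert p.1 1 from rfl]
        rw [PySem.Dict.contains_insert, List.map_cons, List.mem_cons]
        constructor
        · intro h
          rcases Bool.or_eq_true_iff.mp h with h | h
          · exact Or.inl (eq_of_beq h)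
          · exact Or.inr ((ih3 name).mp h)
        · rintro (rfl | h)
          · simp
          · simp [(ih3 name).mpr h]

theorem A_eq_keepLast (ns : List String) (es : List Int) (h : ns.length ≤ es.length) :
    name_depuplication ns es =
      ((keepLast (ns.zip es)).map Prod.fst, (keepLast (ns.zip es)).map Prod.snd) := by
  unfold name_depuplication
  have hdesc : PySem.List.pyRange ((ns.length : Int) - 1) (-1) (-1) =
      (PySem.List.pyRange 0 (ns.length : Int) 1).reverse := by
    have := PySem.List.pyRange_neg_one_eq_reverse ((ns.length : Int) - 1) (-1)
    simpa using this
  rw [hdesc]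
  rw [show (fun (st : List String × List Int × PySem.Dict String Int) (i : Int) =>
        let name := PySem.List.pyGetD ns i ""
        if st.2.2.contains name then st
        else (st.1 ++ [name], st.2.1 ++ [PySem.List.pyGetD es i 0], st.2.2.insert name 1)) =
      (fun (st : List String × List Int × PySem.Dict String Int) (i : Int) =>
        (fun (st : List String × List Int × PySem.Dict String Int) (p : String × Int) =>
          if st.2.2.contains p.1 then st
          else (st.1 ++ [p.1], st.2.1 ++ [p.2], st.2.2.insert p.1 1)) st
        ((fun j => (PySem.List.pyGetD ns j "", PySem.List.pyGetD es j 0)) i)) from rfl]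
  rw [show (List.foldl
      (fun (st : List String × List Int × PySem.Dict String Int) (i : Int) =>
        (fun (st : List String × List Int × PySem.Dict String Int) (p : String × Int) =>
          if st.2.2.contains p.1 then st
          else (st.1 ++ [p.1], st.2.1 ++ [p.2], st.2.2.insert p.1 1)) st
        ((fun j => (PySem.List.pyGetD ns j "", PySem.List.pyGetD es j 0)) i))
      ([], [], PySem.Dict.empty) (PySem.List.pyRange 0 (ns.length : Int) 1).reverse) =
    (((PySem.List.pyRange 0 (ns.length : Int) 1).reverse.map
        (fun j => (PySem.List.pyGetD ns j "", PySem.List.pyGetD es j 0))).foldl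
      (fun (st : List String × List Int × PySem.Dict String Int) (p : String × Int) =>
        if st.2.2.contains p.1 then st
        else (st.1 ++ [p.1], st.2.1 ++ [p.2], st.2.2.insert p.1 1))
      ([], [], PySem.Dict.empty)) from by rw [List.foldl_map]]
  rw [List.map_reverse, pair_map_range ns es h, List.foldl_reverse]
  obtain ⟨h1, h2, -⟩ := A_foldr (ns.zip es)
  refine Prod.ext ?_ ?_
  · show ((ns.zip es).foldr (fun p (st : List String × List Int × PySem.Dict String Int) =>
        if st.2.2.contains p.1 then st
        else (st.1 ++ [p.1], st.2.1 ++ [p.2], st.2.2.insert p.1 1))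
      ([], [], PySem.Dict.empty)).1.reverse = _
    rw [h1, List.reverse_reverse]
  · show ((ns.zip es).foldr (fun p (st : List String × List Int × PySem.Dict String Int) =>
        if st.2.2.contains p.1 then st
        else (st.1 ++ [p.1], st.2.1 ++ [p.2], st.2.2.insert p.1 1))
      ([], [], PySem.Dict.empty)).2.1.reverse = _
    rw [h2, List.reverse_reverse]

-- ---- B side ----

-- the last-index dict: its value for `name` after the fold, by induction on the names
theorem lastDict_aux (names : List String) :
    ∀ (s : Int) (d0 : PySem.Dict String Int) (name : String),
      (name ∉ names →
        ((PySem.List.enumerate names s).foldl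
          (fun (d : PySem.Dict String Int) p => d.insert p.2 p.1) d0).getD name (-1) =
          d0.getD name (-1)) ∧
      (∀ i : Nat, ∀ _ : i < names.length, names[i] = name → name ∉ names.drop (i + 1) →
        ((PySem.List.enumerate names s).foldl
          (fun (d : PySem.Dict String Int) p => d.insert p.2 p.1) d0).getD name (-1) =
          s + i) := by
  induction names with
  | nil =>
    intro s d0 name
    refine ⟨fun _ => rfl, fun i hi => by simp at hi⟩
  | cons x rest ih =>
    intro s d0 name
    rw [PySem.List.enumerate_cons]
    constructor
    · intro hnm
      have hx : name ≠ x := fun he => hnm (he ▸ List.mem_cons_self)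
      have hr : name ∉ rest := fun he => hnm (List.mem_cons_of_mem _ he)
      rw [List.foldl_cons, (ih (s + 1) (d0.insert x s) name).1 hr,
        PySem.Dict.getD_insert, if_neg hx]
    · intro i hi hname hnd
      match i with
      | 0 =>
        simp only [List.getElem_cons_zero] at hname
        have hnd2 : name ∉ rest := by simpa using hnd
        rw [List.foldl_cons, (ih (s + 1) (d0.insert x s) name).1 hnd2, hname,
          PySem.Dict.getD_insert_self]
        omega
      | i + 1 =>
        simp only [List.getElem_cons_succ] at hname
        have hnd' : name ∉ rest.drop (i + 1) := by simpa using hnd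
        rw [List.foldl_cons,
          (ih (s + 1) (d0.insert x s) name).2 i (by simpa using hi) hname hnd']
        push_cast
        ring

-- every name occurring in a list has a last occurrence
theorem exists_lastOcc (names : List String) (name : String) (h : name ∈ names) :
    ∃ j : Nat, ∃ _ : j < names.length, names[j] = name ∧ name ∉ names.drop (j + 1) := by
  induction names with
  | nil => cases h
  | cons x rest ih =>
    by_cases hr : name ∈ rest
    · obtain ⟨j, hj, h1, h2⟩ := ih hr
      exact ⟨j + 1, by simpa using hj, by simpa using h1, by simpa using h2⟩
    · rcases List.mem_cons.mp h with rfl | hc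
      · exact ⟨0, by simp, by simp, by simpa using hr⟩
      · exact absurd hc hr

-- the filter test "this index is its name's last index" ⟺ "the name does not occur later"
theorem lastDict_test (names : List String) (i : Nat) (hi : i < names.length) :
    (((PySem.List.enumerate names 0).foldl
        (fun (d : PySem.Dict String Int) p => d.insert p.2 p.1)
        PySem.Dict.empty).getD names[i] (-1) = (i : Int)) ↔
      names[i] ∉ names.drop (i + 1) := by
  constructor
  · intro hd
    by_contra hmem
    obtain ⟨j, hj, h1, h2⟩ := exists_lastOcc names names[i] (List.getElem_mem hi)
    rw [(lastDict_aux names 0 PySem.Dict.empty names[i]).2 j hj h1 h2] at hd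
    have hji : j = i := by omega
    exact (hji ▸ h2) hmem
  · intro hmem
    rw [(lastDict_aux names 0 PySem.Dict.empty names[i]).2 i hi rfl hmem]
    omega

-- the accumulating pair-fold is a filter
theorem B_fold_filter (cond : Int × (String × Int) → Bool) :
    ∀ (qs : List (Int × (String × Int))) (a1 : List String) (a2 : List Int),
      qs.foldl (fun (acc : List String × List Int) q =>
          if cond q then (acc.1 ++ [q.2.1], acc.2 ++ [q.2.2]) else acc) (a1, a2) =
        (a1 ++ (qs.filter cond).map (fun q => q.2.1),
         a2 ++ (qs.filter cond).map (fun q => q.2.2)) := by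
  intro qs
  induction qs with
  | nil => intro a1 a2; simp
  | cons q rest ih =>
    intro a1 a2
    by_cases hc : cond q
    · simp [List.foldl_cons, hc, ih]
    · simp [List.foldl_cons, hc, ih]

-- the filtered enumeration is keepLast, given a dict that answers the last-index test
theorem B_filter_keepLast (d : PySem.Dict String Int) :
    ∀ (l : List (String × Int)) (s : Int),
      (∀ i : Nat, ∀ _ : i < l.length,
        ((d.getD (l[i]).1 (-1) = s + i) ↔ (l[i]).1 ∉ (l.drop (i + 1)).map Prod.fst)) →
      ((PySem.List.enumerate l s).filter
          (fun q => decide (d.getD q.2.1 (-1) = q.1))).map (fun q => q.2) = keepLast l := by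
  intro l
  induction l with
  | nil => intro s _; simp [PySem.List.enumerate_nil, keepLast]
  | cons p rest ih =>
    intro s hchar
    rw [PySem.List.enumerate_cons]
    have h0 := hchar 0 (by simp)
    simp only [List.getElem_cons_zero, Nat.cast_zero,
      add_zero] at h0
    have hrest := ih (s + 1) (by
      intro i hi
      have hc := hchar (i + 1) (by simpa using hi)
      simp only [List.getElem_cons_succ, List.drop_succ_cons] at hc
      rw [show s + 1 + (i : Int) = s + ((i : Nat) + 1 : Nat) by push_cast; ring]
      exact hc)
    by_cases hmem : p.1 ∈ rest.map Prod.fst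
    · have hne : ¬ (d.getD p.1 (-1) = s) := fun he => (h0.mp he) hmem
      rw [List.filter_cons, keepLast, if_pos hmem]
      have hdec : (decide (d.getD (s, p).2.1 (-1) = (s, p).1)) = false := by
        simpa using hne
      rw [hdec]
      simpa using hrest
    · have heq : d.getD p.1 (-1) = s := h0.mpr hmem
      rw [List.filter_cons, keepLast, if_neg hmem]
      have hdec : (decide (d.getD (s, p).2.1 (-1) = (s, p).1)) = true := by
        simpa using heq
      rw [hdec]
      simp only [if_true, List.map_cons]
      rw [hrest]

theorem B_eq_keepLast (ns : List String) (es : List Int) (h : ns.length ≤ es.length) :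
    name_depuplication_alt ns es =
      ((keepLast (ns.zip es)).map Prod.fst, (keepLast (ns.zip es)).map Prod.snd) := by
  unfold name_depuplication_alt
  show (List.foldl (fun (acc : List String × List Int) (q : Int × (String × Int)) =>
      if ((PySem.List.enumerate ns 0).foldl
            (fun (d : PySem.Dict String Int) p => d.insert p.2 p.1)
            PySem.Dict.empty).getD q.2.1 (-1) = q.1
      then (acc.1 ++ [q.2.1], acc.2 ++ [q.2.2]) else acc)
    ([], []) (PySem.List.enumerate (ns.zip es) 0)) = _
  rw [show (fun (acc : List String × List Int) (q : Int × (String × Int)) =>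
      if ((PySem.List.enumerate ns 0).foldl
            (fun (d : PySem.Dict String Int) p => d.insert p.2 p.1)
            PySem.Dict.empty).getD q.2.1 (-1) = q.1
      then (acc.1 ++ [q.2.1], acc.2 ++ [q.2.2]) else acc) =
    (fun (acc : List String × List Int) (q : Int × (String × Int)) =>
      if (fun q : Int × (String × Int) =>
            decide (((PySem.List.enumerate ns 0).foldl
              (fun (d : PySem.Dict String Int) p => d.insert p.2 p.1)
              PySem.Dict.empty).getD q.2.1 (-1) = q.1)) q
      then (acc.1 ++ [q.2.1], acc.2 ++ [q.2.2]) else acc) from by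
    funext acc q
    by_cases hq : ((PySem.List.enumerate ns 0).foldl
        (fun (d : PySem.Dict String Int) p => d.insert p.2 p.1)
        PySem.Dict.empty).getD q.2.1 (-1) = q.1 <;> simp [hq]]
  rw [B_fold_filter]
  have hchar : ∀ i : Nat, ∀ _ : i < (ns.zip es).length,
      ((((PySem.List.enumerate ns 0).foldl
          (fun (d : PySem.Dict String Int) p => d.insert p.2 p.1)
          PySem.Dict.empty).getD (((ns.zip es)[i]).1) (-1) = 0 + i) ↔
        ((ns.zip es)[i]).1 ∉ ((ns.zip es).drop (i + 1)).map Prod.fst) := by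
    intro i hi
    have hin : i < ns.length := by rw [List.length_zip] at hi; omega
    have hie : i < es.length := by rw [List.length_zip] at hi; omega
    have hz : ((ns.zip es)[i]'hi).1 = ns[i] := by
      simp [List.getElem_zip]
    have hdm : ((ns.zip es).drop (i + 1)).map Prod.fst = ns.drop (i + 1) := by
      show ((List.zipWith Prod.mk ns es).drop (i + 1)).map Prod.fst = ns.drop (i + 1)
      rw [List.drop_zipWith]
      exact List.map_fst_zip (by simp; omega)
    rw [hz, hdm, show (0 : Int) + i = (i : Int) by ring]
    exact lastDict_test ns i hin
  have hmain := B_filter_keepLast ((PySem.List.enumerate ns 0).foldl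
      (fun (d : PySem.Dict String Int) p => d.insert p.2 p.1) PySem.Dict.empty)
      (ns.zip es) 0 hchar
  refine Prod.ext ?_ ?_
  · simpa using congrArg (List.map Prod.fst) hmain
  · simpa using congrArg (List.map Prod.snd) hmain

-- ===== VERDICT (by name: the statement is the Claim_ definition above) =====
theorem name_depuplication_spec : Claim_equal_name_depuplication := by
  intro ns es _ hpre
  unfold Spec_name_depuplication
  rw [A_eq_keepLast ns es hpre, B_eq_keepLast ns es hpre]
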